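-- pv_equiv track=rewrite | github.com/masajoki/atcoder | abc237_c.py | removePrea
-- ===== SOURCE A (Python) =====
-- def removePrea(A):
--     B=[]
--     prea=True
--     for i in range(len(A)):
--         if A[i]!='a':
--             prea=False
--         if prea==False:
--             B.append(A[i])
--     return B
-- ===== SOURCE B (Python) =====
-- def removePrea(A):
--     i = 0
--     n = len(A)
--     while i < n and A[i] == 'a':
--         i += 1
--     return list(A[i:])
-- ===== Notes on version B (the rewrite author's own statement) =====
-- stated objective: idiomatic
-- what changed: B first finds the length of the leading run of 'a' with a while loop and then returns the suffix by one slice, instead of A's single pass maintaining a boolean flag and appending element by element.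
import Mathlib
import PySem

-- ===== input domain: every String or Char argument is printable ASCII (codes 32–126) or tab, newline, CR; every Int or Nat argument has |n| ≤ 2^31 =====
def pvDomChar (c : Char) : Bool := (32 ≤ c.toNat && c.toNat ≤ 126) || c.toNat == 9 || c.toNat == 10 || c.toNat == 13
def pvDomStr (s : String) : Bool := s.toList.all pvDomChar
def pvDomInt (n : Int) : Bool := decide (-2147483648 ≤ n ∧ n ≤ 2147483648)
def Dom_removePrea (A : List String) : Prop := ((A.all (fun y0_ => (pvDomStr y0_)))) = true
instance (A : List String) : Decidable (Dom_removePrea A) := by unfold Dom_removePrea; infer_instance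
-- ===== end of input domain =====

-- B finds the boundary first, then returns the suffix by one slice; A keeps a boolean flag and appends one element at a time.

-- ===== PORT A =====
-- the loop body: state (B, prea), branches in the Python's order
def removePreaStep (st : List String × Bool) (a : String) : List String × Bool :=
  let prea := if a ≠ "a" then false else st.2
  let B := if prea = false then st.1 ++ [a] else st.1
  (B, prea)

def removePrea (A : List String) : List String :=
  (A.foldl removePreaStep ([], true)).1

-- ===== PORT B =====
-- while i < n and A[i] == 'a': i += 1  — the leading-run length
def preaLen (A : List String) : Nat :=
  match A with
  | [] => 0
  | a :: rest => if a = "a" then 1 + preaLen rest else 0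

-- return list(A[i:])
def removePrea_alt (A : List String) : List String :=
  A.drop (preaLen A)

-- ===== PRECONDITION & SPEC =====
def Spec_removePrea (A : List String) (out : List String) : Prop := out = removePrea_alt A
instance (A : List String) (out : List String) : Decidable (Spec_removePrea A out) := by unfold Spec_removePrea; infer_instance

-- ===== CLAIM (what is proved, stated in full; the proofs are below) =====
def Claim_equal_removePrea : Prop := ∀ (A : List String), Dom_removePrea A → Spec_removePrea A (removePrea A)

-- ===== LEMMAS AND PROOFS =====

-- once prea is false, the fold just appends every remaining element
theorem removePrea_foldl_false (A : List String) (B : List String) :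
    A.foldl removePreaStep (B, false) = (B ++ A, false) := by
  induction A generalizing B with
  | nil => simp
  | cons a rest ih => simp [removePreaStep, ih]

theorem removePrea_eq_alt (A : List String) : removePrea A = removePrea_alt A := by
  induction A with
  | nil => rfl
  | cons a rest ih =>
    by_cases h : a = "a"
    · subst h
      have h1 : removePrea ("a" :: rest) = removePrea rest := by
        simp [removePrea, removePreaStep]
      have h2 : removePrea_alt ("a" :: rest) = removePrea_alt rest := by
        simp [removePrea_alt, preaLen, Nat.add_comm]
      rw [h1, h2, ih]
    · simp [removePrea, removePrea_alt, preaLen, h, removePreaStep, removePrea_foldl_false]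

-- ===== VERDICT (by name: the statement is the Claim_ definition above) =====
theorem removePrea_spec : Claim_equal_removePrea := by
  intro A _
  exact removePrea_eq_alt A
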